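-- pv_equiv track=rewrite | github.com/hoffstadt/DearPyGui | thirdparty/cpython/Tools/scripts/nm2def.py | export_list
-- ===== SOURCE A (Python) =====
-- def export_list(symbols):
--
--     data = []
--     code = []
--     for name,(addr,type) in symbols.items():
--         if type in ('C','D'):
--             data.append('\t'+name)
--         else:
--             code.append('\t'+name)
--     data.sort()
--     data.append('')
--     code.sort()
--     return ' DATA\n'.join(data)+'\n'+'\n'.join(code)
-- ===== SOURCE B (Python) =====
-- def export_list(symbols):
--     # One combined sort of (is_code, name) tuples (False sorts before True, so data
--     # comes first, each group name-sorted); each entry is mapped straight to its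
--     # final chunk of output text -- code lines carry their separating '\n' as a
--     # prefix, so the section divider merges with the first code line; a trailing
--     # '\n' is added only when no code symbol exists to supply it.
--     entries = sorted((typ not in ('C', 'D'), name)
--                      for name, (addr, typ) in symbols.items())
--     text = ''.join('\n\t' + name if is_code else '\t' + name + ' DATA\n'
--                    for is_code, name in entries)
--     return text if entries and entries[-1][0] else text + '\n'
-- ===== Notes on version B (the rewrite author's own statement) =====
-- stated objective: alternative
-- what changed: B performs ONE combined sort of (is_code, name) tuples and maps each sorted entry directly to its final output chunk (code lines carry their '\n' separator as a prefix, a trailing '\n' is appended only when no code entry exists), replacing A's partition-into-two-lists, sort-each-group and sentinel-''-join assembly.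
import Mathlib
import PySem

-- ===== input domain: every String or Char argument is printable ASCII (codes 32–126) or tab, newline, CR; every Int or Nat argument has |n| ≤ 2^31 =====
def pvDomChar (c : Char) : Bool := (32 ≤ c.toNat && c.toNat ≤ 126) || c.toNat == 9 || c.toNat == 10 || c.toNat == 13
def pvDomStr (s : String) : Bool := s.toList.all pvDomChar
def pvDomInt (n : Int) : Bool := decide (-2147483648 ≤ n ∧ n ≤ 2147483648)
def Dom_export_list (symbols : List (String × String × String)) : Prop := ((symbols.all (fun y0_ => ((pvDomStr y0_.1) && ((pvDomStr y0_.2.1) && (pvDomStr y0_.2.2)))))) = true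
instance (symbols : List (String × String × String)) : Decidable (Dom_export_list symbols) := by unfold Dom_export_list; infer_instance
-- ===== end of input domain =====

-- B replaces A's partition-into-two-lists/sort-each/sentinel-join scheme by ONE combined
-- sort of (is_code, name) tuples followed by a direct map of each entry to its final text
-- chunk (code lines carry their separating '\n' as a prefix), with a trailing '\n' only
-- when no code entry supplies it.  `symbols` is a Python dict, so both ports first build
-- the insertion-ordered dict (PySem.Dict.ofList), exactly as Python deduplicates keys.

-- ===== PORT A =====
def export_list (symbols : List (String × String × String)) : String :=
  let d : PySem.Dict String (String × String) := PySem.Dict.ofList symbols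
  let dc := d.items.foldl
    (fun (acc : List (List Char) × List (List Char)) q =>
      if q.2.2 == "C" || q.2.2 == "D" then (acc.1 ++ ['\t' :: q.1.toList], acc.2)
      else (acc.1, acc.2 ++ ['\t' :: q.1.toList])) ([], [])
  let data := PySem.List.sorted dc.1 (fun x => x)
  let data := data ++ [[]]
  let code := PySem.List.sorted dc.2 (fun x => x)
  String.ofList (PySem.Chars.join " DATA\n".toList data ++ '\n' :: PySem.Chars.join ['\n'] code)

-- ===== PORT B =====
-- Python sorts the (bool, str) tuples lexicographically (False < True, then string order);
-- the sort key `prefix-char :: name` realizes exactly that order, so this `sorted` call is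
-- an exact port of Source B's `sorted(...)` on tuples.
def export_list_alt (symbols : List (String × String × String)) : String :=
  let d : PySem.Dict String (String × String) := PySem.Dict.ofList symbols
  let entries := PySem.List.sorted
      (d.items.map (fun q => (!(q.2.2 == "C" || q.2.2 == "D"), q.1.toList)))
      (fun e => (if e.1 then '\x01' else '\x00') :: e.2)
  let text := PySem.Chars.join []
      (entries.map (fun e =>
        if e.1 then '\n' :: '\t' :: e.2 else '\t' :: e.2 ++ " DATA\n".toList))
  if (entries.getLast?.map (·.1)).getD false
  then String.ofList text
  else String.ofList (text ++ ['\n'])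

-- ===== PRECONDITION & SPEC =====
def Spec_export_list (symbols : List (String × String × String)) (out : String) : Prop := out = export_list_alt symbols
instance (symbols : List (String × String × String)) (out : String) : Decidable (Spec_export_list symbols out) := by unfold Spec_export_list; infer_instance

-- ===== CLAIM (what is proved, stated in full; the proofs are below) =====
def Claim_equal_export_list : Prop := ∀ (symbols : List (String × String × String)), Dom_export_list symbols → Spec_export_list symbols (export_list symbols)

-- ===== LEMMAS AND PROOFS =====

lemma pvJoinCode : ∀ (xs : List (List Char)) (x : List Char),
    '\n' :: PySem.Chars.join ['\n'] (x :: xs) = '\n' :: x ++ (xs.map ('\n' :: ·)).flatten := by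
  intro xs
  induction xs with
  | nil => intro x; simp [PySem.Chars.join, List.intercalate, List.intersperse]
  | cons y ys ih =>
      intro x
      have := ih y
      simp_all [PySem.Chars.join, List.intercalate, List.intersperse]

lemma pvInstK {α : Type} (xs : List α) (key : α → List Char) : @PySem.List.sorted α (List Char) List.instLT (fun a b => a.decidableLT b) xs key false = @PySem.List.sorted α (List Char) (inferInstance : LinearOrder (List Char)).toLT LinearOrder.toDecidableLT xs key false := by congr 1

lemma pvSortedStrict (l : List (List Char)) (hnd : l.Nodup) :
    (PySem.List.sorted l (fun x => x)).Pairwise (· < ·) := by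
  rw [pvInstK l]
  have h1 := PySem.List.sorted_pairwise (κ := List Char) l (fun x => x)
  have h2 : (@PySem.List.sorted (List Char) (List Char) (inferInstance : LinearOrder (List Char)).toLT LinearOrder.toDecidableLT l (fun x => x) false).Nodup := by
    rw [← pvInstK l]
    exact (PySem.List.sorted_perm l _ false).nodup_iff.mpr hnd
  exact (h1.and h2).imp (fun h => lt_of_le_of_ne h.1 h.2)

lemma pvSortedMapMono (l : List (List Char)) (hnd : l.Nodup) (c : Char) :
    PySem.List.sorted (l.map (c :: ·)) (fun x => x)
      = (PySem.List.sorted l (fun x => x)).map (c :: ·) := by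
  rw [pvInstK (l.map (c :: ·))]
  refine PySem.List.sorted_eq_of_perm_of_pairwise_lt _ _ _ ?_ ?_
  · exact (PySem.List.sorted_perm l _ false).map _
  · exact (List.pairwise_map).mpr ((pvSortedStrict l hnd).imp
      (fun h => List.cons_lt_cons_self.mpr h))

lemma pvEntriesSorted (items : List (String × String × String))
    (hnd : (items.map (fun q => q.1.toList)).Nodup) (p : String × String × String → Bool) :
    PySem.List.sorted (items.map (fun q => (!(p q), q.1.toList)))
        (fun e : Bool × List Char => (if e.1 then '\x01' else '\x00') :: e.2)
      = (PySem.List.sorted ((items.filter p).map (fun q => q.1.toList)) (fun x => x)).map (fun n => (false, n))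
        ++ (PySem.List.sorted ((items.filter (fun q => !(p q))).map (fun q => q.1.toList)) (fun x => x)).map (fun n => (true, n)) := by
  have hndD : ((items.filter p).map (fun q => q.1.toList)).Nodup :=
    ((List.filter_sublist (l := items)).map _).nodup hnd
  have hndC : ((items.filter (fun q => !(p q))).map (fun q => q.1.toList)).Nodup :=
    ((List.filter_sublist (l := items)).map _).nodup hnd
  rw [pvInstK]
  refine PySem.List.sorted_eq_of_perm_of_pairwise_lt _ _ _ ?_ ?_
  · -- permutation
    refine List.Perm.trans ?_ ((List.filter_append_perm p items).map (fun q => (!(p q), q.1.toList)))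
    rw [List.map_append]
    refine List.Perm.append ?_ ?_
    · have he : (items.filter p).map (fun q => (!(p q), q.1.toList))
          = ((items.filter p).map (fun q => q.1.toList)).map (fun n => ((false : Bool), n)) := by
        rw [List.map_map]
        refine List.map_congr_left ?_
        intro q hq
        have hpq := List.of_mem_filter hq
        simp [hpq]
      rw [he]
      exact ((PySem.List.sorted_perm _ _ false).map _)
    · have he : (items.filter (fun q => !(p q))).map (fun q => (!(p q), q.1.toList))
          = ((items.filter (fun q => !(p q))).map (fun q => q.1.toList)).map (fun n => ((true : Bool), n)) := by
        rw [List.map_map]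
        refine List.map_congr_left ?_
        intro q hq
        have hpq := List.of_mem_filter hq
        simp at hpq
        simp [hpq]
      rw [he]
      exact ((PySem.List.sorted_perm _ _ false).map _)
  · -- pairwise
    rw [List.pairwise_append]
    refine ⟨(List.pairwise_map).mpr ((pvSortedStrict _ hndD).imp (fun h => List.cons_lt_cons_self.mpr h)),
            (List.pairwise_map).mpr ((pvSortedStrict _ hndC).imp (fun h => List.cons_lt_cons_self.mpr h)),
            ?_⟩
    intro a ha b hb
    simp only [List.mem_map] at ha hb
    obtain ⟨n, _, rfl⟩ := ha
    obtain ⟨m, _, rfl⟩ := hb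
    show ((if (false:Bool) = true then '\x01' else '\x00') :: n) < ((if (true:Bool) = true then '\x01' else '\x00') :: m)
    simp only [if_neg (by decide : ¬ (false:Bool) = true)]
    exact List.Lex.rel (by decide)

lemma pvFoldPair {α : Type} (p : α → Bool) (f g : α → List Char) (l : List α)
    (acc : List (List Char) × List (List Char)) :
    l.foldl (fun acc x => if p x then (acc.1 ++ [f x], acc.2) else (acc.1, acc.2 ++ [g x])) acc
      = (acc.1 ++ (l.filter p).map f, acc.2 ++ (l.filter (fun x => !p x)).map g) := by
  induction l generalizing acc with
  | nil => simp
  | cons x xs ih => by_cases h : p x <;> simp [h, ih]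

lemma pvJoinNil : ∀ xs : List (List Char), PySem.Chars.join [] xs = xs.flatten := by
  intro xs
  induction xs with
  | nil => rfl
  | cons x xs ih => cases xs <;> simp_all [PySem.Chars.join, List.intercalate, List.intersperse]

lemma pvJoinSentinel (sep : List Char) :
    ∀ xs : List (List Char), PySem.Chars.join sep (xs ++ [[]]) = (xs.map (· ++ sep)).flatten := by
  intro xs
  induction xs with
  | nil => rfl
  | cons x xs ih => cases xs <;> simp_all [PySem.Chars.join, List.intercalate, List.intersperse]


-- ===== VERDICT (by name: the statement is the Claim_ definition above) =====
theorem export_list_spec : Claim_equal_export_list := by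
  intro symbols _
  unfold Spec_export_list
  unfold export_list export_list_alt
  simp only []
  rw [pvFoldPair (fun q : String × String × String => (q.2.2 == "C" || q.2.2 == "D"))
      (fun q => '\t' :: q.1.toList) (fun q => '\t' :: q.1.toList)]
  simp only [List.nil_append]
  set items := (PySem.Dict.ofList symbols).items with hitems
  have hndk : (items.map (·.1)).Nodup := PySem.Dict.nodup_keys_ofList symbols
  have hnd : (items.map (fun q => q.1.toList)).Nodup := by
    have := hndk.map (f := String.toList) (fun a b h => String.toList_inj.mp h)
    rwa [List.map_map] at this
  have hndD : ((items.filter (fun q => q.2.2 == "C" || q.2.2 == "D")).map (fun q => q.1.toList)).Nodup :=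
    ((List.filter_sublist (l := items)).map _).nodup hnd
  have hndC : ((items.filter (fun q => !(q.2.2 == "C" || q.2.2 == "D"))).map (fun q => q.1.toList)).Nodup :=
    ((List.filter_sublist (l := items)).map _).nodup hnd
  have hc1 : (items.filter (fun q => q.2.2 == "C" || q.2.2 == "D")).map (fun q => '\t' :: q.1.toList)
      = ((items.filter (fun q => q.2.2 == "C" || q.2.2 == "D")).map (fun q => q.1.toList)).map ('\t' :: ·) := by
    rw [List.map_map]; rfl
  have hc2 : (items.filter (fun q => !(q.2.2 == "C" || q.2.2 == "D"))).map (fun q => '\t' :: q.1.toList)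
      = ((items.filter (fun q => !(q.2.2 == "C" || q.2.2 == "D"))).map (fun q => q.1.toList)).map ('\t' :: ·) := by
    rw [List.map_map]; rfl
  rw [hc1, hc2, pvSortedMapMono _ hndD, pvSortedMapMono _ hndC,
      pvEntriesSorted items hnd (fun q => q.2.2 == "C" || q.2.2 == "D")]
  set D := PySem.List.sorted ((items.filter (fun q => q.2.2 == "C" || q.2.2 == "D")).map (fun q => q.1.toList)) (fun x => x) with hD
  set C := PySem.List.sorted ((items.filter (fun q => !(q.2.2 == "C" || q.2.2 == "D"))).map (fun q => q.1.toList)) (fun x => x) with hC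
  clear_value D C
  rw [pvJoinSentinel, List.map_append, List.map_map, List.map_map, pvJoinNil, List.flatten_append]
  simp only [Function.comp_def, List.map_map, Bool.false_eq_true, ite_false, ite_true]
  rcases C with _ | ⟨c, cs⟩
  · simp only [List.map_nil, List.append_nil, List.flatten_nil]
    rw [List.getLast?_map]
    cases hDL : D.getLast? <;>
      simp [PySem.Chars.join, List.intercalate, List.intersperse]
  · rw [List.getLast?_append_of_ne_nil _ (by simp), List.getLast?_map]
    have hlast : (c :: cs).getLast? = some ((c::cs).getLast (by simp)) :=
      List.getLast?_eq_some_getLast (by simp)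
    rw [hlast]
    simp only [Option.map_some, Option.getD_some, if_true]
    rw [List.map_cons, pvJoinCode (cs.map (fun x => '\t' :: x)) ('\t' :: c), List.map_map]
    simp [Function.comp_def]
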